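-- pv_equiv track=rewrite | github.com/Chrisu8/outersum | main.py | calculate_outer_sums
-- ===== SOURCE A (Python) =====
-- def calculate_outer_sums(matrix):
--     n = len(matrix)
--     outer_sums = []
--
--     for i in range(n):
--         sum = 0
--         for row in range(i):
--             for col in range(i + 1, n):
--                 sum += matrix[row][col]
--         outer_sums.append(sum)
--
--     return outer_sums
-- ===== SOURCE B (Python) =====
-- def _prefix(row):
--     # pre[c] = sum(row[:c]), built in one forward pass
--     pre = [0]
--     acc = 0
--     for x in row:
--         acc += x
--         pre.append(acc)
--     return pre
--
-- def calculate_outer_sums(matrix):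
--     n = len(matrix)
--     pres = [_prefix(row) for row in matrix]
--     # sum(row[i+1:n]) = pre[min(n, len)] - pre[min(i+1, len)]  (slice-clamp formula)
--     return [sum(pres[r][min(n, len(pres[r]) - 1)] - pres[r][min(i + 1, len(pres[r]) - 1)]
--                 for r in range(i))
--             for i in range(n)]
-- ===== Notes on version B (the rewrite author's own statement) =====
-- stated objective: faster
-- what changed: Replaces the triple nested loop (for each i, re-summing the whole upper-right rectangle element by element) by one forward prefix-sum pass per row followed by an O(1) clamped slice-sum query per (i, row) pair, O(n^2) instead of O(n^3); Pre_ excludes only the ragged matrices on which A itself raises IndexError (some row among the first n-2 shorter than n), where B still returns the clamped sums.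
import Mathlib
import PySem

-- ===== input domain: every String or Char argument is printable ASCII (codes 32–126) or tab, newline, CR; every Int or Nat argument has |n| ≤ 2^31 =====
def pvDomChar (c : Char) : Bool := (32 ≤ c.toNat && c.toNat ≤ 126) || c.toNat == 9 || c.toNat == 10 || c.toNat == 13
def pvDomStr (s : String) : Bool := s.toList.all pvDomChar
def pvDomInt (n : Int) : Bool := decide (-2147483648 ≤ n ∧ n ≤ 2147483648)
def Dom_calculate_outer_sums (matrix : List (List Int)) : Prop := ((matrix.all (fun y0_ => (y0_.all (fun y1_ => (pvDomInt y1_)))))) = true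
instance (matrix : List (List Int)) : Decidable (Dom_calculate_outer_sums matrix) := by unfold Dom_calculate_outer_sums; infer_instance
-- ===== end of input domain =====

-- B replaces A's triple nested loop by one forward prefix-sum pass per row plus an O(1)
-- clamped slice-sum query per (i, row) pair; equivalence is on the return value.

-- ===== PORT A =====
def calculate_outer_sums (matrix : List (List Int)) : List Int :=
  let n : Int := matrix.length
  (PySem.List.pyRange 0 n 1).foldl (fun outer_sums i =>
    let s : Int := (PySem.List.pyRange 0 i 1).foldl (fun s row =>
      (PySem.List.pyRange (i + 1) n 1).foldl (fun s col =>
        s + PySem.List.pyGetD (PySem.List.pyGetD matrix row []) col 0) s) 0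
    outer_sums ++ [s]) []

-- ===== PORT B =====
-- prefix sums of a row: pre[c] = sum(row[:c]), one forward pass (Source B's _prefix)
def pvPrefix (row : List Int) : List Int :=
  (row.foldl (fun (st : Int × List Int) x => (st.1 + x, st.2 ++ [st.1 + x]))
    ((0 : Int), ([0] : List Int))).2

def calculate_outer_sums_alt (matrix : List (List Int)) : List Int :=
  let n := matrix.length
  let pres := matrix.map pvPrefix
  (List.range n).map (fun i =>
    ((List.range i).map (fun r =>
      (pres.getD r []).getD (min n ((pres.getD r []).length - 1)) 0
        - (pres.getD r []).getD (min (i + 1) ((pres.getD r []).length - 1)) 0)).sum)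

-- ===== PRECONDITION & SPEC =====
-- Pre_ excludes exactly the inputs on which A raises IndexError: ragged matrices in which
-- one of the first n-2 rows is shorter than n (A indexes columns r+2..n-1 of those rows).
def Pre_calculate_outer_sums (matrix : List (List Int)) : Prop :=
  ∀ row ∈ matrix.take (matrix.length - 2), matrix.length ≤ row.length
instance (matrix : List (List Int)) : Decidable (Pre_calculate_outer_sums matrix) := by
  unfold Pre_calculate_outer_sums; infer_instance
def pvWitness_calculate_outer_sums : List (List Int) := [[1, 2], [3, 4]]

def Spec_calculate_outer_sums (matrix : List (List Int)) (out : List Int) : Prop := out = calculate_outer_sums_alt matrix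
instance (matrix : List (List Int)) (out : List Int) : Decidable (Spec_calculate_outer_sums matrix out) := by unfold Spec_calculate_outer_sums; infer_instance

-- ===== CLAIM (what is proved, stated in full; the proofs are below) =====
def Claim_equal_calculate_outer_sums : Prop := ∀ (matrix : List (List Int)), Dom_calculate_outer_sums matrix → Pre_calculate_outer_sums matrix → Spec_calculate_outer_sums matrix (calculate_outer_sums matrix)

-- ===== LEMMAS AND PROOFS =====

theorem pv_go_spec (l : List Int) (a : Int) (s : List Int) :
    l.foldl (fun (st : Int × List Int) x => (st.1 + x, st.2 ++ [st.1 + x])) (a, s)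
      = (a + l.sum, s ++ (List.range l.length).map (fun j => a + (l.take (j + 1)).sum)) := by
  induction l generalizing a s with
  | nil => simp
  | cons x l ih =>
      simp only [List.foldl_cons, ih, List.sum_cons, List.length_cons,
        List.range_succ_eq_map, List.map_cons, List.map_map]
      refine Prod.ext (by ring) ?_
      simp only [List.append_assoc, List.singleton_append, List.take_succ_cons,
        List.sum_cons, Function.comp_def]
      congr 1
      simp
      intro a1 _
      ring

theorem pvPrefix_spec (l : List Int) :
    pvPrefix l = 0 :: (List.range l.length).map (fun j => (l.take (j + 1)).sum) := by
  unfold pvPrefix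
  rw [pv_go_spec]
  simp

theorem pvPrefix_length (l : List Int) : (pvPrefix l).length = l.length + 1 := by
  rw [pvPrefix_spec]; simp

theorem pvPrefix_getD (l : List Int) (c : Nat) (hc : c ≤ l.length) :
    (pvPrefix l).getD c 0 = (l.take c).sum := by
  rw [pvPrefix_spec]
  cases c with
  | zero => simp
  | succ j =>
      simp only [List.getD_cons_succ]
      rw [List.getD_eq_getElem?_getD, List.getElem?_map, List.getElem?_range (by omega)]
      simp

-- query of B: pre[min n len] - pre[min (i+1) len] = sum of row[i+1:n]
theorem pv_query (row : List Int) (n i : Nat) (hin : i + 1 ≤ n) :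
    (pvPrefix row).getD (min n ((pvPrefix row).length - 1)) 0
      - (pvPrefix row).getD (min (i + 1) ((pvPrefix row).length - 1)) 0
      = ((row.take n).drop (i + 1)).sum := by
  rw [pvPrefix_length]
  simp only [Nat.add_sub_cancel]
  rw [pvPrefix_getD _ _ (by omega), pvPrefix_getD _ _ (by omega)]
  have h1 : row.take (min n row.length) = row.take n := by
    rcases Nat.le_total n row.length with h | h
    · rw [Nat.min_eq_left h]
    · rw [Nat.min_eq_right h, List.take_of_length_le h, List.take_of_length_le (by omega)]
  have h2 : row.take (min (i + 1) row.length) = row.take (i + 1) := by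
    rcases Nat.le_total (i + 1) row.length with h | h
    · rw [Nat.min_eq_left h]
    · rw [Nat.min_eq_right h, List.take_of_length_le h, List.take_of_length_le (by omega)]
  rw [h1, h2]
  have h3 : (row.take n).take (i + 1) = row.take (i + 1) := by
    rw [List.take_take, Nat.min_eq_left hin]
  calc (row.take n).sum - (row.take (i + 1)).sum
      = ((row.take n).take (i + 1)).sum + ((row.take n).drop (i + 1)).sum
          - (row.take (i + 1)).sum := by
        rw [← List.sum_append, List.take_append_drop]
    _ = ((row.take n).drop (i + 1)).sum := by rw [h3]; ring

theorem pv_row_mem_take (matrix : List (List Int)) (r : Nat) (hr : r < matrix.length - 2) :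
    matrix.getD r [] ∈ matrix.take (matrix.length - 2) := by
  have hr' : r < matrix.length := by omega
  rw [List.getD_eq_getElem?_getD, List.getElem?_eq_getElem hr', Option.getD_some]
  have h : (matrix.take (matrix.length - 2))[r]'(by simp; omega) = matrix[r] :=
    List.getElem_take
  rw [← h]
  exact List.getElem_mem _

theorem pv_pres_getD (matrix : List (List Int)) (r : Nat) (hr : r < matrix.length) :
    (matrix.map pvPrefix).getD r [] = pvPrefix (matrix.getD r []) := by
  rw [List.getD_eq_getElem?_getD, List.getElem?_map,
    List.getElem?_eq_getElem hr, List.getD_eq_getElem?_getD,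
    List.getElem?_eq_getElem hr]
  simp

-- ===== VERDICT (by name: the statement is the Claim_ definition above) =====
theorem calculate_outer_sums_spec : Claim_equal_calculate_outer_sums := by
  intro matrix _ hpre
  unfold Spec_calculate_outer_sums calculate_outer_sums calculate_outer_sums_alt
  simp only [PySem.List.foldl_add, PySem.List.foldl_append_singleton_eq_map,
    List.nil_append, PySem.List.pyRange_zero_nat, List.map_map]
  apply List.map_congr_left
  intro k hk
  rw [List.mem_range] at hk
  simp only [Function.comp_def, zero_add, PySem.List.pyRange_zero_nat, List.map_map]
  apply congrArg List.sum
  apply List.map_congr_left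
  intro r hr
  rw [List.mem_range] at hr
  have hrk : r < matrix.length := by omega
  rw [pv_pres_getD matrix r hrk, pv_query _ _ _ (by omega)]
  have hrowD : PySem.List.pyGetD matrix (r : Int) [] = matrix.getD r [] := by
    simp [PySem.List.pyGetD_natCast]
  simp only [hrowD]
  set row := matrix.getD r [] with hrow
  rcases Nat.lt_or_ge (k + 1) matrix.length with hkn | hkn
  · -- k+1 < n: Pre_ gives n ≤ row.length; A's column scan is the slice
    have hrlt : r < matrix.length - 2 := by omega
    have hlen : matrix.length ≤ row.length := hpre _ (pv_row_mem_take matrix r hrlt)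
    have hmapeq : (PySem.List.pyRange ((k : Int) + 1) (matrix.length : Int) 1).map
          (fun c => PySem.List.pyGetD row c 0)
        = (PySem.List.pyRange ((k : Int) + 1) (matrix.length : Int) 1).map
          (fun c => PySem.List.pyGetD (row.take matrix.length) c 0) := by
      apply List.map_congr_left
      intro c hc
      rw [PySem.List.mem_pyRange_one] at hc
      have h0 : (0 : Int) ≤ c := by omega
      have h1 : c < (row.length : Int) := by omega
      have h2 : c < ((row.take matrix.length).length : Int) := by simp; omega
      rw [PySem.List.pyGetD_eq_getElem _ _ h0 h1, PySem.List.pyGetD_eq_getElem _ _ h0 h2]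
      exact (List.getElem_take).symm
    rw [hmapeq]
    have hlen2 : ((row.take matrix.length).length : Int) = (matrix.length : Int) := by
      simp; omega
    rw [← hlen2, PySem.List.map_pyGetD_pyRange' _ _ (by positivity)]
    have htn : ((k : Int) + 1).toNat = k + 1 := by omega
    rw [htn]
  · -- k+1 = n: both sides are empty sums
    rw [PySem.List.pyRange_one_eq_nil (by omega),
      List.drop_eq_nil_of_le (by simp; omega)]
    simp
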